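-- pv_equiv track=rewrite | github.com/PMArkive/Pokemon-Forme-Insertion | utilities.py | entire_of_column
-- ===== SOURCE A (Python) =====
-- def entire_of_column(input_table, column_number, allow_multiple = True):
--     table_temp = []
--     last_element = ''
--     for rows in input_table:
--         if(not(rows[column_number] in {'', "NA"}) and (allow_multiple or rows[column_number] != last_element)):
--             table_temp.append(rows[column_number])
--         last_element = rows[column_number]
--     return(table_temp)
-- ===== SOURCE B (Python) =====
-- def entire_of_column(input_table, column_number, allow_multiple = True):
--     # Two-phase decomposition: extract the column, run-length encode it,
--     # then emit each run (skipping ''/'NA'), whole run if allow_multiple else once.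
--     values = [row[column_number] for row in input_table]
--     runs = []
--     for v in values:
--         if runs and runs[-1][0] == v:
--             runs[-1][1] += 1
--         else:
--             runs.append([v, 1])
--     out = []
--     for v, n in runs:
--         if v not in ('', 'NA'):
--             out.extend([v] * (n if allow_multiple else 1))
--     return out
-- ===== Notes on version B (the rewrite author's own statement) =====
-- stated objective: alternative
-- what changed: Replaced the single pass with a last_element register by a two-phase pipeline: extract the column, run-length encode it, then emit each run once or len(run) times, skipping ''/'NA'.
import Mathlib
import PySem

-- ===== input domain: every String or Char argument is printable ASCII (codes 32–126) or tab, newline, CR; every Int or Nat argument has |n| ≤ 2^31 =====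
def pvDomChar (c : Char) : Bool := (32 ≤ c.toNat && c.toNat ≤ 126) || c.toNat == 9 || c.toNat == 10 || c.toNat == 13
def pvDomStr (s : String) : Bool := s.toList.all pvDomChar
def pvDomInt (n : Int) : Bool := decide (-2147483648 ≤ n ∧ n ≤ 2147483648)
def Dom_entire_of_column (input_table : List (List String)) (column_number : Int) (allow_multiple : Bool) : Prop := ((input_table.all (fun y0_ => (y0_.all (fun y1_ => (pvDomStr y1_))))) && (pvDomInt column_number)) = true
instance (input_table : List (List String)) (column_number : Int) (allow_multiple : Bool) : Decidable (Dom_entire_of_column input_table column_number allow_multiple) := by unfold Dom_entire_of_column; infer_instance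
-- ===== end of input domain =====

-- B replaces A's single pass with a last_element register by a two-phase pipeline
-- (run-length encode the column, then emit the runs); same cost, alternative structure.

-- ===== PORT A =====
-- the 'for rows in input_table' loop: state (table_temp, last_element); rows[column_number] via pyGetD (Pre_ keeps the index in range)
def entireGoA (column_number : Int) (allow_multiple : Bool) (table_temp : List String) (last_element : String) : List (List String) → List String
  | [] => table_temp
  | rows :: rest =>
      let v := PySem.List.pyGetD rows column_number ""
      entireGoA column_number allow_multiple
        (if !(v == "" || v == "NA") && (allow_multiple || v != last_element) then table_temp ++ [v] else table_temp)
        v rest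

def entire_of_column (input_table : List (List String)) (column_number : Int) (allow_multiple : Bool) : List String :=
  entireGoA column_number allow_multiple [] "" input_table

-- ===== PORT B =====
-- run-length encoding loop of Source B: acc holds the runs newest-first (acc head = runs[-1]), reversed at the end
def rleAux (acc : List (String × Nat)) : List String → List (String × Nat)
  | [] => acc.reverse
  | v :: rest =>
      match acc with
      | (v', n) :: t => if v' == v then rleAux ((v', n + 1) :: t) rest else rleAux ((v, 1) :: (v', n) :: t) rest
      | [] => rleAux [(v, 1)] rest

def entire_of_column_alt (input_table : List (List String)) (column_number : Int) (allow_multiple : Bool) : List String :=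
  let values := input_table.map (fun row => PySem.List.pyGetD row column_number "")
  let runs := rleAux [] values
  runs.flatMap (fun p => if p.1 == "" || p.1 == "NA" then [] else List.replicate (if allow_multiple then p.2 else 1) p.1)

-- ===== PRECONDITION & SPEC =====
-- Pre_ excludes exactly the inputs where Python's rows[column_number] raises IndexError (some row too short for the index)
def Pre_entire_of_column (input_table : List (List String)) (column_number : Int) (allow_multiple : Bool) : Prop :=
  ∀ rows ∈ input_table, PySem.Raise.InRange rows.length column_number
instance (input_table : List (List String)) (column_number : Int) (allow_multiple : Bool) : Decidable (Pre_entire_of_column input_table column_number allow_multiple) := by unfold Pre_entire_of_column; infer_instance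

def pvWitness_entire_of_column : List (List String) × Int × Bool := ([["x", ""], ["x", "NA"], ["y", "y"]], 0, false)

def Spec_entire_of_column (input_table : List (List String)) (column_number : Int) (allow_multiple : Bool) (out : List String) : Prop := out = entire_of_column_alt input_table column_number allow_multiple
instance (input_table : List (List String)) (column_number : Int) (allow_multiple : Bool) (out : List String) : Decidable (Spec_entire_of_column input_table column_number allow_multiple out) := by unfold Spec_entire_of_column; infer_instance

-- ===== CLAIM (what is proved, stated in full; the proofs are below) =====
def Claim_equal_entire_of_column : Prop := ∀ (input_table : List (List String)) (column_number : Int) (allow_multiple : Bool), Dom_entire_of_column input_table column_number allow_multiple → Pre_entire_of_column input_table column_number allow_multiple → Spec_entire_of_column input_table column_number allow_multiple (entire_of_column input_table column_number allow_multiple)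

-- ===== LEMMAS AND PROOFS =====

-- the per-element emission A performs, abstracted over the column values
def emitFrom (am : Bool) (last : String) : List String → List String
  | [] => []
  | v :: rest => (if !(v == "" || v == "NA") && (am || v != last) then [v] else []) ++ emitFrom am v rest

-- what B emits for one run
def emitRun (am : Bool) (p : String × Nat) : List String :=
  if p.1 == "" || p.1 == "NA" then [] else List.replicate (if am then p.2 else 1) p.1

-- B's emission of an open run (v', n) followed by the remaining values
def fRun (am : Bool) (v' : String) (n : Nat) : List String → List String
  | [] => emitRun am (v', n)
  | v :: rest => if v' == v then fRun am v' (n + 1) rest else emitRun am (v', n) ++ fRun am v 1 rest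

theorem entireGoA_eq (cn : Int) (am : Bool) (it : List (List String)) :
    ∀ (acc : List String) (last : String),
      entireGoA cn am acc last it = acc ++ emitFrom am last (it.map (fun row => PySem.List.pyGetD row cn "")) := by
  induction it with
  | nil => intro acc last; simp [entireGoA, emitFrom]
  | cons rows rest ih =>
      intro acc last
      simp only [entireGoA, List.map_cons, emitFrom]
      rw [ih]
      split <;> simp

theorem rleAux_emit (am : Bool) (vs : List String) :
    ∀ (v' : String) (n : Nat) (t : List (String × Nat)),
      (rleAux ((v', n) :: t) vs).flatMap (emitRun am)
        = t.reverse.flatMap (emitRun am) ++ fRun am v' n vs := by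
  induction vs with
  | nil => intro v' n t; simp [rleAux, fRun]
  | cons v rest ih =>
      intro v' n t
      simp only [rleAux, fRun]
      split
      · rw [ih]
      · rw [ih v 1 ((v', n) :: t)]
        simp

theorem fRun_eq (am : Bool) (vs : List String) :
    ∀ (v' : String) (n : Nat), 1 ≤ n →
      fRun am v' n vs = emitRun am (v', n) ++ emitFrom am v' vs := by
  induction vs with
  | nil => intro v' n _; simp [fRun, emitFrom]
  | cons v rest ih =>
      intro v' n hn
      simp only [fRun, emitFrom]
      by_cases h : (v' == v) = true
      · have hv : v' = v := by simpa using h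
        subst hv
        rw [if_pos h, ih v' (n + 1) (by omega)]
        have : emitRun am (v', n + 1) = emitRun am (v', n) ++ (if (!(v' == "" || v' == "NA")) && am then [v'] else []) := by
          by_cases h1 : (v' == "") = true <;> by_cases h2 : (v' == "NA") = true <;>
            cases am <;> simp [emitRun, h1, h2, List.replicate_succ']
        rw [this]
        simp
      · rw [if_neg h, ih v 1 (le_refl 1)]
        have hvv : ¬ v = v' := fun hE => h (by simp [hE])
        have : emitRun am (v, 1) = (if (!(v == "" || v == "NA")) && (am || v != v') then [v] else []) := by
          by_cases h1 : (v == "") = true <;> by_cases h2 : (v == "NA") = true <;>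
            cases am <;> simp [emitRun, h1, h2, hvv]
        rw [this]

theorem main_eq (cn : Int) (am : Bool) (it : List (List String)) :
    entire_of_column it cn am = entire_of_column_alt it cn am := by
  show entireGoA cn am [] "" it
      = (rleAux [] (it.map (fun row => PySem.List.pyGetD row cn ""))).flatMap (emitRun am)
  rw [entireGoA_eq]
  simp only [List.nil_append]
  generalize (it.map (fun row => PySem.List.pyGetD row cn "")) = vs
  cases vs with
  | nil => simp [rleAux, emitFrom]
  | cons v rest =>
      show emitFrom am "" (v :: rest) = (rleAux [(v, 1)] rest).flatMap (emitRun am)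
      rw [rleAux_emit am rest v 1 []]
      rw [fRun_eq am rest v 1 (le_refl 1)]
      simp only [List.reverse_nil, List.flatMap_nil, List.nil_append, emitFrom]
      have : (if (!(v == "" || v == "NA")) && (am || v != "") then [v] else []) = emitRun am (v, 1) := by
        by_cases h1 : (v == "") = true <;> by_cases h2 : (v == "NA") = true <;>
          cases am <;> simp_all [emitRun]
      rw [this]

-- ===== VERDICT (by name: the statement is the Claim_ definition above) =====
theorem entire_of_column_spec : Claim_equal_entire_of_column := by
  intro it cn am _ _
  exact (main_eq cn am it).symm ▸ rfl
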